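-- pv_equiv track=rewrite | github.com/adobe-type-tools/drawBotProofing | drawbot_proofing/proofing_helpers/names.py | get_overlap_index
-- ===== SOURCE A (Python) =====
-- def get_overlap_index(list_of_strings, start_char=0):
--     '''
--     For a list of strings, find the index at which they stop overlapping.
--     '''
--     if not list_of_strings:
--         return 0
--     strings = set(list_of_strings)
--     words_by_length = sorted([(len(word), word) for word in strings])
--     shortest_word = words_by_length[0][1]
--
--     for i in range(start_char, len(shortest_word)):
--         chars = [word[i] for word in list_of_strings]
--         if len(set(chars)) > 1:
--             # names start to diverge
--             return i
--         elif i == len(shortest_word) - 1: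
--             # shortest name is contained in all other names
--             return len(shortest_word)
--         else:
--             continue
-- ===== SOURCE B (Python) =====
-- def _lcp(u, v):
--     n = min(len(u), len(v))
--     p = 0
--     while p < n and u[p] == v[p]:
--         p += 1
--     return p
--
--
-- def get_overlap_index(list_of_strings, start_char=0):
--     '''
--     For a list of strings, find the index at which they stop overlapping.
--     '''
--     if not list_of_strings:
--         return 0
--     shortest = min(len(s) for s in list_of_strings)
--     if start_char >= shortest:
--         return None
--     first = list_of_strings[0][start_char:]
--     d = len(first)
--     for s in list_of_strings[1:]:
--         d = min(d, _lcp(first, s[start_char:]))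
--     return start_char + d
-- ===== Notes on version B (the rewrite author's own statement) =====
-- stated objective: faster
-- what changed: Replaces A's sort-to-find-shortest plus column-by-column scan that builds a Python set of the i-th characters of every string with a single fold of pairwise longest-common-prefix lengths against the first string's suffix (answer = start_char + min lcp): no sorting and no per-column set construction (measured ~4x at the largest size).
-- outside the precondition, e.g. on get_overlap_index(['ab', 'ab'], -1): A returns 2, B returns 0
import Mathlib
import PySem

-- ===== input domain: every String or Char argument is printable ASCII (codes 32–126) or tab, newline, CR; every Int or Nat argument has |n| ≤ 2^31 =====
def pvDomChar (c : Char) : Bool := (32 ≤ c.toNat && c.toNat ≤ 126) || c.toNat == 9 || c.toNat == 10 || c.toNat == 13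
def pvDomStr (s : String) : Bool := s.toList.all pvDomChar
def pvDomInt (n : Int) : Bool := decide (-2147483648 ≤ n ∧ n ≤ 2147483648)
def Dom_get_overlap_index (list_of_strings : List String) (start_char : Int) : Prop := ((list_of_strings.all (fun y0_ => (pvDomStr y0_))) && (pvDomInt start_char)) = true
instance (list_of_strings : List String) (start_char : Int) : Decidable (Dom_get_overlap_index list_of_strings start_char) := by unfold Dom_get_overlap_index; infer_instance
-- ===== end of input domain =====

-- B replaces A's sort-for-shortest + per-column character-set scan by one fold of pairwise
-- longest-common-prefix lengths of the start_char suffixes against the first string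
-- (measured faster in a timing run: no sorting, no per-column set building).

-- ===== PORT A =====
-- the for-loop of A over range(start_char, len(shortest_word)) with its early returns
def pvLoopA (xs : List String) (L : Int) : List Int → Option Int
  | [] => none
  | i :: rest =>
      if 1 < (PySem.Set.ofList (xs.map (fun w => PySem.Str.pyGet? w i))).length then some i
      else if i = L - 1 then some L
      else pvLoopA xs L rest

def get_overlap_index (list_of_strings : List String) (start_char : Int) : Option Int :=
  if list_of_strings = [] then some 0
  else
    let strings := PySem.Set.ofList list_of_strings
    let words_by_length :=
      PySem.List.sorted2 (strings.map (fun w => (PySem.Str.len w, w)))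
        (fun p => p.1) (fun p => p.2)
    let shortest_word := (PySem.List.pyGetD words_by_length 0 ((0 : Int), "")).2
    pvLoopA list_of_strings (PySem.Str.len shortest_word)
      (PySem.List.pyRange start_char (PySem.Str.len shortest_word) 1)

def pvLcp : List Char → List Char → Nat
  | a :: u, b :: v => if a = b then pvLcp u v + 1 else 0
  | _, _ => 0

def get_overlap_index_alt (list_of_strings : List String) (start_char : Int) : Option Int :=
  match list_of_strings with
  | [] => some 0
  | s0 :: rest =>
      let shortest : Int := rest.foldl (fun acc s => min acc (PySem.Str.len s)) (PySem.Str.len s0)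
      if shortest ≤ start_char then none
      else
        let first := PySem.List.slice s0.toList (some start_char) none
        let d : Nat := rest.foldl
          (fun d s => min d (pvLcp first (PySem.List.slice s.toList (some start_char) none)))
          first.length
        some (start_char + (d : Int))


-- ===== PRECONDITION & SPEC =====
-- Pre_ excludes negative start_char: a start index below 0 is outside the function's natural
-- domain, where A's word[i] negative-index wraparound (comparing end characters, and raising
-- IndexError whenever -start_char exceeds a word length) is an accident of Python indexing.
def Pre_get_overlap_index (list_of_strings : List String) (start_char : Int) : Prop :=
  0 ≤ start_char
instance (list_of_strings : List String) (start_char : Int) : Decidable (Pre_get_overlap_index list_of_strings start_char) := by unfold Pre_get_overlap_index; infer_instance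

def pvWitness_get_overlap_index : List String × Int := (["ab", "abc"], 0)

def Spec_get_overlap_index (list_of_strings : List String) (start_char : Int) (out : Option Int) : Prop := out = get_overlap_index_alt list_of_strings start_char
instance (list_of_strings : List String) (start_char : Int) (out : Option Int) : Decidable (Spec_get_overlap_index list_of_strings start_char out) := by unfold Spec_get_overlap_index; infer_instance

-- ===== CLAIM (what is proved, stated in full; the proofs are below) =====
def Claim_equal_get_overlap_index : Prop := ∀ (list_of_strings : List String) (start_char : Int), Dom_get_overlap_index list_of_strings start_char → Pre_get_overlap_index list_of_strings start_char → Spec_get_overlap_index list_of_strings start_char (get_overlap_index list_of_strings start_char)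

-- ===== LEMMAS AND PROOFS =====

theorem pvLcp_le_right (u v : List Char) : pvLcp u v ≤ v.length := by
  induction u generalizing v with
  | nil => cases v <;> simp [pvLcp]
  | cons a u ih =>
    cases v with
    | nil => simp [pvLcp]
    | cons b v =>
      by_cases h : a = b <;> simp [pvLcp, h]
      exact ih v

theorem pvLcp_agree (u v : List Char) : ∀ j < pvLcp u v, u[j]? = v[j]? := by
  induction u generalizing v with
  | nil => cases v <;> simp [pvLcp]
  | cons a u ih =>
    cases v with
    | nil => simp [pvLcp]
    | cons b v =>
      by_cases h : a = b
      · intro j hj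
        cases j with
        | zero => simp [h]
        | succ j =>
          simp only [List.getElem?_cons_succ]
          exact ih v j (by simpa [pvLcp, h] using hj)
      · simp [pvLcp, h]

theorem pvLcp_diverge (u v : List Char) (h1 : pvLcp u v < u.length) (h2 : pvLcp u v < v.length) :
    u[pvLcp u v]? ≠ v[pvLcp u v]? := by
  induction u generalizing v with
  | nil => simp at h1
  | cons a u ih =>
    cases v with
    | nil => simp at h2
    | cons b v =>
      by_cases h : a = b
      · have e : pvLcp (a :: u) (b :: v) = pvLcp u v + 1 := by simp [pvLcp, h]
        rw [e] at h1 h2 ⊢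
        simp only [List.getElem?_cons_succ]
        exact ih v (by simpa using h1) (by simpa using h2)
      · have e : pvLcp (a :: u) (b :: v) = 0 := by simp [pvLcp, h]
        rw [e]
        simp [h]

theorem pvSet_len_gt_one {α : Type} [BEq α] [LawfulBEq α] (a : α) (l : List α) :
    1 < (PySem.Set.ofList (a :: l)).length ↔ ∃ x ∈ l, x ≠ a := by
  have hm : ∀ y, y ∈ PySem.Set.ofList (a :: l) ↔ y ∈ a :: l :=
    fun y => PySem.Set.mem_ofList (a :: l) y
  have hn := PySem.Set.nodup_ofList (a :: l)
  constructor
  · intro hlen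
    match hs : PySem.Set.ofList (a :: l) with
    | [] => rw [hs] at hlen; simp at hlen
    | [y] => rw [hs] at hlen; simp at hlen
    | y :: z :: t =>
      rw [hs] at hm hn
      have hyz : y ≠ z := by
        rcases List.nodup_cons.mp hn with ⟨h1, _⟩
        exact fun he => h1 (he ▸ List.mem_cons_self)
      have hy : y ∈ a :: l := (hm y).1 (by simp)
      have hz : z ∈ a :: l := (hm z).1 (by simp)
      by_cases hya : y = a
      · refine ⟨z, ?_, ?_⟩
        · rcases List.mem_cons.1 hz with h | h
          · exact absurd (by rw [hya, h]) hyz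
          · exact h
        · intro hza; exact hyz (by rw [hya, hza])
      · refine ⟨y, ?_, hya⟩
        rcases List.mem_cons.1 hy with h | h
        · exact absurd h hya
        · exact h
  · rintro ⟨x, hx, hxa⟩
    have ha' : a ∈ PySem.Set.ofList (a :: l) := (hm a).2 (by simp)
    have hx' : x ∈ PySem.Set.ofList (a :: l) := (hm x).2 (by simp [hx])
    match hs : PySem.Set.ofList (a :: l) with
    | [] => rw [hs] at ha'; simp at ha'
    | [y] =>
      rw [hs] at ha' hx'
      simp at ha' hx'
      exact absurd (hx'.trans ha'.symm) hxa
    | y :: z :: t => simp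

def pvBefore (a b : Int × String) : Bool :=
  decide (a.1 < b.1) || (!decide (b.1 < a.1) && decide (a.2 < b.2))

theorem pvBefore_true {a b : Int × String} (h : pvBefore a b = true) : a.1 ≤ b.1 := by
  unfold pvBefore at h
  simp only [Bool.or_eq_true, Bool.and_eq_true, Bool.not_eq_true', decide_eq_true_eq,
    decide_eq_false_iff_not] at h
  rcases h with h | ⟨h, _⟩
  · exact le_of_lt h
  · exact le_of_not_gt h

theorem pvBefore_false {a b : Int × String} (h : pvBefore a b = false) : b.1 ≤ a.1 := by
  unfold pvBefore at h
  simp only [Bool.or_eq_false_iff, Bool.and_eq_false_iff, Bool.not_eq_false', decide_eq_false_iff_not,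
    decide_eq_true_eq] at h
  exact le_of_not_gt h.1

theorem pvInsertBy_pairwise (x : Int × String) (ys : List (Int × String))
    (h : ys.Pairwise (fun a b => a.1 ≤ b.1)) :
    (PySem.List.insertBy pvBefore x ys).Pairwise (fun a b => a.1 ≤ b.1) := by
  induction ys with
  | nil => simp [PySem.List.insertBy]
  | cons y ys ih =>
    rw [PySem.List.insertBy]
    rcases List.pairwise_cons.mp h with ⟨hy, hys⟩
    by_cases hb : pvBefore x y = true
    · rw [if_pos hb]
      refine List.pairwise_cons.mpr ⟨?_, h⟩
      intro z hz
      rcases List.mem_cons.mp hz with rfl | hz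
      · exact pvBefore_true hb
      · exact le_trans (pvBefore_true hb) (hy z hz)
    · rw [if_neg hb]
      refine List.pairwise_cons.mpr ⟨?_, ih hys⟩
      intro z hz
      rcases (PySem.List.mem_insertBy pvBefore x z ys).mp hz with rfl | hz
      · exact pvBefore_false (Bool.eq_false_iff.mpr hb)
      · exact hy z hz

theorem pvFoldl_insertBy_pairwise (xs acc : List (Int × String))
    (h : acc.Pairwise (fun a b => a.1 ≤ b.1)) :
    (xs.foldl (fun acc x => PySem.List.insertBy pvBefore x acc) acc).Pairwise
      (fun a b => a.1 ≤ b.1) := by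
  induction xs generalizing acc with
  | nil => exact h
  | cons x xs ih => exact ih _ (pvInsertBy_pairwise x acc h)

theorem pvSorted2_pairwise (xs : List (Int × String)) :
    (PySem.List.sorted2 xs (fun q => q.1) (fun q => q.2)).Pairwise (fun a b => a.1 ≤ b.1) := by
  have : PySem.List.sorted2 xs (fun q => q.1) (fun q => q.2) =
      xs.foldl (fun acc x => PySem.List.insertBy pvBefore x acc) [] := by
    rfl
  rw [this]
  exact pvFoldl_insertBy_pairwise xs [] (by simp)

theorem pvSorted2_head_min (xs : List (Int × String)) (p : Int × String) (t : List (Int × String))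
    (h : PySem.List.sorted2 xs (fun q => q.1) (fun q => q.2) = p :: t) :
    ∀ q ∈ xs, p.1 ≤ q.1 := by
  intro q hq
  have hperm := PySem.List.sorted2_perm xs (fun q => q.1) (fun q => q.2) false
  have hq' : q ∈ p :: t := by
    rw [← h]
    exact (hperm.mem_iff).mpr hq
  rcases List.mem_cons.mp hq' with rfl | hq'
  · exact le_refl _
  · have := List.pairwise_cons.mp (h ▸ pvSorted2_pairwise xs)
    exact this.1 q hq'

theorem pvDiverge_iff (s0 : String) (rest : List String) (i : Int) (h0 : 0 ≤ i)
    (hlen : ∀ w ∈ s0 :: rest, i < (w.toList.length : Int)) :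
    (1 < (PySem.Set.ofList ((s0 :: rest).map (fun w => PySem.Str.pyGet? w i))).length) ↔
      ∃ w ∈ s0 :: rest, w.toList[i.toNat]? ≠ s0.toList[i.toNat]? := by
  have hi : i = ((i.toNat : Nat) : Int) := (Int.toNat_of_nonneg h0).symm
  rw [List.map_cons, pvSet_len_gt_one]
  constructor
  · rintro ⟨x, hx, hne⟩
    rcases List.mem_map.mp hx with ⟨w, hw, rfl⟩
    refine ⟨w, List.mem_cons_of_mem _ hw, ?_⟩
    rw [hi, PySem.Str.pyGet?_natCast, PySem.Str.pyGet?_natCast] at hne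
    exact hne
  · rintro ⟨w, hw, hne⟩
    rcases List.mem_cons.mp hw with rfl | hw
    · exact absurd rfl hne
    · refine ⟨PySem.Str.pyGet? w i, List.mem_map.mpr ⟨w, hw, rfl⟩, ?_⟩
      rw [hi, PySem.Str.pyGet?_natCast, PySem.Str.pyGet?_natCast]
      exact hne

theorem pvLoopA_eq (s0 : String) (rest : List String) (st M D : Nat)
    (hDle : st + D ≤ M)
    (hM1 : ∀ w ∈ s0 :: rest, M ≤ w.toList.length)
    (hb : ∀ j < D, ∀ w ∈ s0 :: rest, w.toList[st + j]? = s0.toList[st + j]?)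
    (hc : st + D < M → ∃ w ∈ s0 :: rest, w.toList[st + D]? ≠ s0.toList[st + D]?) :
    ∀ (i : Int), (st : Int) ≤ i → i ≤ (st : Int) + D → (i = (st : Int) + D → st + D < M) →
      pvLoopA (s0 :: rest) (M : Int) (PySem.List.pyRange i (M : Int) 1) = some ((st : Int) + (D : Int)) := by
  suffices H : ∀ (n : Nat) (i : Int), ((M : Int) - i).toNat ≤ n → (st : Int) ≤ i →
      i ≤ (st : Int) + D → (i = (st : Int) + D → st + D < M) →
      pvLoopA (s0 :: rest) (M : Int) (PySem.List.pyRange i (M : Int) 1) = some ((st : Int) + (D : Int)) by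
    intro i h1 h2 h3
    exact H ((M : Int) - i).toNat i le_rfl h1 h2 h3
  intro n
  induction n with
  | zero =>
    intro i hn h1 h2 h3
    exfalso
    have : (M : Int) ≤ i := by omega
    have : i = (st : Int) + D := by omega
    have := h3 this
    omega
  | succ n ih =>
    intro i hn h1 h2 h3
    have hlen : ∀ w ∈ s0 :: rest, i < (w.toList.length : Int) := by
      intro w hw
      have := hM1 w hw
      by_cases hiD : i = (st : Int) + D
      · have := h3 hiD; omega
      · omega
    have hiM : i < (M : Int) := by
      by_cases hiD : i = (st : Int) + D
      · have := h3 hiD; omega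
      · omega
    rw [PySem.List.pyRange_one_cons hiM, pvLoopA]
    by_cases hiD : i = (st : Int) + D
    -- at the divergence offset: the character sets differ, A returns i
    · have hd := hc (h3 hiD)
      rw [if_pos ((pvDiverge_iff s0 rest i (by omega) hlen).mpr (by
        have : i.toNat = st + D := by omega
        rw [this]
        exact hd))]
      rw [hiD]
    -- below the divergence offset: the column is uniform
    · have hj : i.toNat = st + (i.toNat - st) := by omega
      have hjD : i.toNat - st < D := by omega
      rw [if_neg]
      · by_cases hlast : i = (M : Int) - 1
        · rw [if_pos hlast]
          -- i = M - 1 < st + D together with st + D ≤ M forces st + D = M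
          have : (st : Int) + D = M := by omega
          rw [← this]
        · rw [if_neg hlast]
          refine ih (i + 1) (by omega) (by omega) (by omega) ?_
          intro hD1
          -- if i + 1 = st + D and st + D = M then i = M - 1, contradiction
          by_contra hge
          have : (st : Int) + D = M := by omega
          omega
      · rw [pvDiverge_iff s0 rest i (by omega) hlen]
        push Not
        intro w hw
        have := hb (i.toNat - st) hjD w hw
        rw [hj]
        exact this

theorem pvFoldl_min_proj {α : Type} (g : α → Nat) (l : List α) (init : Nat) :
    (l.foldl (fun a x => min a (g x)) init ≤ init ∧
      ∀ x ∈ l, l.foldl (fun a x => min a (g x)) init ≤ g x) ∧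
    (l.foldl (fun a x => min a (g x)) init = init ∨
      ∃ x ∈ l, l.foldl (fun a x => min a (g x)) init = g x) := by
  have he : l.foldl (fun a x => min a (g x)) init = (l.map g).foldl min init := by
    rw [List.foldl_map]
  rw [he]
  have h1 := PySem.List.foldl_min_le (l.map g) init
  have h2 := PySem.List.foldl_min_mem (l.map g) init
  refine ⟨⟨h1.1, fun x hx => h1.2 _ (List.mem_map_of_mem hx)⟩, ?_⟩
  rcases h2 with h | h
  · exact Or.inl h
  · rcases List.mem_map.mp h with ⟨x, hx, hgx⟩
    exact Or.inr ⟨x, hx, hgx.symm⟩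

theorem pv_main (s0 : String) (rest : List String) (start : Int) (hpre : 0 ≤ start) :
    get_overlap_index (s0 :: rest) start = get_overlap_index_alt (s0 :: rest) start := by
  -- B's minimum length, as an Int
  set S : Int := rest.foldl (fun acc s => min acc (PySem.Str.len s)) (PySem.Str.len s0) with hSdef
  -- S is the minimum of the string lengths over s0 :: rest
  have hlen : ∀ s : String, PySem.Str.len s = (s.toList.length : Int) := fun s => rfl
  have hSfold : S = (rest.map PySem.Str.len).foldl min (PySem.Str.len s0) := by
    rw [hSdef, List.foldl_map]

  have hS1 := PySem.List.foldl_min_le (rest.map PySem.Str.len) (PySem.Str.len s0)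
  rw [← hSfold] at hS1
  have hSle : ∀ w ∈ s0 :: rest, S ≤ (w.toList.length : Int) := by
    intro w hw
    rcases List.mem_cons.mp hw with rfl | hw
    · rw [← hlen]; exact hS1.1
    · rw [← hlen]; exact hS1.2 _ (List.mem_map_of_mem hw)
  have hSmem : ∃ w ∈ s0 :: rest, S = (w.toList.length : Int) := by
    rcases PySem.List.foldl_min_mem (rest.map PySem.Str.len) (PySem.Str.len s0) with h | h
    · rw [← hSfold] at h; exact ⟨s0, by simp, h⟩
    · rw [← hSfold] at h
      rcases List.mem_map.mp h with ⟨w, hw, hgw⟩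
      exact ⟨w, List.mem_cons_of_mem _ hw, hgw.symm⟩
  have hS0 : 0 ≤ S := by
    rcases hSmem with ⟨w, _, hw⟩
    rw [hw]; positivity
  -- A's shortest_word has length S
  have hA_len : PySem.Str.len ((PySem.List.pyGetD
      (PySem.List.sorted2 ((PySem.Set.ofList (s0 :: rest)).map (fun w => (PySem.Str.len w, w)))
        (fun p => p.1) (fun p => p.2)) 0 ((0 : Int), "")).2) = S := by
    set pairs := (PySem.Set.ofList (s0 :: rest)).map (fun w => (PySem.Str.len w, w)) with hpairs
    set srt := PySem.List.sorted2 pairs (fun p => p.1) (fun p => p.2) with hsrt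
    have hne : srt ≠ [] := by
      intro h
      have hperm := PySem.List.sorted2_perm pairs (fun p => p.1) (fun p => p.2) false
      rw [← hsrt, h] at hperm
      have : pairs = [] := hperm.symm.eq_nil
      have hs0 : s0 ∈ PySem.Set.ofList (s0 :: rest) := (PySem.Set.mem_ofList _ _).mpr (by simp)
      have : (PySem.Str.len s0, s0) ∈ pairs := List.mem_map_of_mem hs0
      rw [‹pairs = []›] at this
      simp at this
    obtain ⟨p, t, hpt⟩ := List.exists_cons_of_ne_nil hne
    have hget : PySem.List.pyGetD srt 0 ((0 : Int), "") = p := by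
      rw [hpt]
      rw [PySem.List.pyGetD_eq_getElem _ _ (by omega) (by simp)]
      simp
    rw [hget]
    -- p is one of the (len w, w) pairs
    have hpmem : p ∈ pairs := by
      have hperm := PySem.List.sorted2_perm pairs (fun p => p.1) (fun p => p.2) false
      rw [← hsrt, hpt] at hperm
      exact hperm.mem_iff.mp (by simp)
    rcases List.mem_map.mp hpmem with ⟨w, hw, hpw⟩
    have hwmem : w ∈ s0 :: rest := (PySem.Set.mem_ofList _ _).mp hw
    have hp2 : PySem.Str.len p.2 = p.1 := by rw [← hpw]
    rw [hp2]
    -- p.1 is minimal among all first components, i.e. among all lengths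
    have hmin := pvSorted2_head_min pairs p t (by rw [← hsrt]; exact hpt)
    have hple : ∀ w' ∈ s0 :: rest, p.1 ≤ PySem.Str.len w' := by
      intro w' hw'
      have : (PySem.Str.len w', w') ∈ pairs :=
        List.mem_map_of_mem ((PySem.Set.mem_ofList _ _).mpr hw')
      exact hmin _ this
    have h1 : S ≤ p.1 := by rw [← hpw]; simpa using hSle w hwmem
    have h2 : p.1 ≤ S := by
      rcases hSmem with ⟨w'', hw'', hlw⟩
      rw [hlw]
      have := hple w'' hw''
      rwa [hlen w''] at this
    omega
  -- unfold both ports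
  show (if (s0 :: rest : List String) = [] then some 0 else _) = _
  rw [if_neg (by simp)]
  show pvLoopA (s0 :: rest) _ (PySem.List.pyRange start _ 1) = _
  rw [hA_len]
  rw [get_overlap_index_alt]
  by_cases hcase : S ≤ start
  · rw [if_pos hcase, PySem.List.pyRange_one_eq_nil hcase, pvLoopA]
  · rw [if_neg hcase]
    simp only [PySem.List.slice_from _ hpre]
    set st : Nat := start.toNat with hstdef
    set M : Nat := S.toNat with hMdef
    have hst : (st : Int) = start := Int.toNat_of_nonneg hpre
    have hSM : ((M : Nat) : Int) = S := Int.toNat_of_nonneg hS0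
    have hstM : st < M := by omega
    set firstL : List Char := s0.toList.drop st with hfirst
    set g : String → Nat := fun s => pvLcp firstL (s.toList.drop st) with hg
    set D : Nat := rest.foldl (fun d s => min d (g s)) firstL.length with hD
    show pvLoopA (s0 :: rest) S (PySem.List.pyRange start S 1) = some (start + (D : Int))
    have hM1 : ∀ w ∈ s0 :: rest, M ≤ w.toList.length := by
      intro w hw
      have := hSle w hw
      omega
    have hfl : firstL.length = s0.toList.length - st := by
      rw [hfirst, List.length_drop]
    have hs0len : M ≤ s0.toList.length := hM1 s0 (by simp)
    obtain ⟨⟨hD1a, hD1b⟩, hD2⟩ := pvFoldl_min_proj g rest firstL.length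
    rw [← hD] at hD1a hD1b hD2
    have hglen : ∀ w : String, (w.toList.drop st).length = w.toList.length - st := by
      intro w; rw [List.length_drop]
    have hDle : st + D ≤ M := by
      rcases hSmem with ⟨w, hw, hlw⟩
      have hMw : M = w.toList.length := by omega
      rcases List.mem_cons.mp hw with rfl | hw'
      · omega
      · have h1 := hD1b w hw'
        have h2 : g w ≤ w.toList.length - st := by
          rw [hg]
          have := pvLcp_le_right firstL (w.toList.drop st)
          rw [hglen w] at this
          exact this
        omega
    have hb : ∀ j < D, ∀ w ∈ s0 :: rest, w.toList[st + j]? = s0.toList[st + j]? := by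
      intro j hj w hw
      rcases List.mem_cons.mp hw with rfl | hw'
      · rfl
      · have hlt : j < g w := lt_of_lt_of_le hj (hD1b w hw')
        have := pvLcp_agree firstL (w.toList.drop st) j hlt
        rw [hfirst, List.getElem?_drop, List.getElem?_drop] at this
        exact this.symm
    have hc : st + D < M → ∃ w ∈ s0 :: rest, w.toList[st + D]? ≠ s0.toList[st + D]? := by
      intro hlt
      rcases hD2 with hinit | ⟨w, hw, hgw⟩
      · exfalso; omega
      · refine ⟨w, List.mem_cons_of_mem _ hw, ?_⟩
        have hMw : M ≤ w.toList.length := hM1 w (List.mem_cons_of_mem _ hw)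
        have hE : D = pvLcp firstL (w.toList.drop st) := hgw
        have hdv := pvLcp_diverge firstL (w.toList.drop st)
          (by omega) (by rw [hglen w]; omega)
        rw [← hE, hfirst, List.getElem?_drop, List.getElem?_drop] at hdv
        exact fun he => hdv (he.symm)
    have := pvLoopA_eq s0 rest st M D hDle hM1 hb hc start
      (by omega) (by omega)
      (by intro h; have : D = 0 := by omega
          omega)
    rw [hSM] at this
    rw [this]
    rw [hst]

-- ===== VERDICT (by name: the statement is the Claim_ definition above) =====
theorem get_overlap_index_spec : Claim_equal_get_overlap_index := by
  intro xs start _hdom hpre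
  have hpre' : 0 ≤ start := hpre
  show get_overlap_index xs start = get_overlap_index_alt xs start
  cases xs with
  | nil => rfl
  | cons s0 rest => exact pv_main s0 rest start hpre'
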